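-- pv_equiv track=rewrite | github.com/narennravi/Guvi-Codekata-ARRAYS | 56.py | alternate_array_sort
-- ===== SOURCE A (Python) =====
-- def alternate_array_sort(arr):
--     arr.sort()
--     left, right = 0, len(arr) - 1
--     result = []
--
--     while left <= right:
--         if left == right:
--             result.append(arr[left])
--         else:
--             result.append(arr[right])
--             result.append(arr[left])
--
--         left += 1
--         right -= 1
--
--     return result
-- ===== SOURCE B (Python) =====
-- def alternate_array_sort(arr):
--     arr.sort()
--     n = len(arr)
--     larges = list(reversed(arr[(n + 1) // 2:]))
--     smalls = arr[:n // 2]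
--     result = [x for pair in zip(larges, smalls) for x in pair]
--     if n % 2 == 1:
--         result.append(arr[n // 2])
--     return result
-- ===== Notes on version B (the rewrite author's own statement) =====
-- stated objective: alternative
-- what changed: Replaces the two-pointer inward while-loop with a build-two-halves-then-zip construction: sort, split into the upper half reversed (descending maxima) and the lower half (ascending minima), interleave them with zip, and append the middle element for odd length.
import Mathlib
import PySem

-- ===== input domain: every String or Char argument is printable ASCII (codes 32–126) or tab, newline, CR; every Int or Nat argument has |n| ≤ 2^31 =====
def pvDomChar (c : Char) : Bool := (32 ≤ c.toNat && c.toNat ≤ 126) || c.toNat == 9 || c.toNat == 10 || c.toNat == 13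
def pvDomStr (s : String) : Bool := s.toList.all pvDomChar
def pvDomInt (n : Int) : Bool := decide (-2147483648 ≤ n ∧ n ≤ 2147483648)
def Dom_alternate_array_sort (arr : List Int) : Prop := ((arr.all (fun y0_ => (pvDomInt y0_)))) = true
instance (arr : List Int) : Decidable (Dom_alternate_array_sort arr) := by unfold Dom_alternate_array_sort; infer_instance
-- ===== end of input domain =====

-- B replaces A's two-pointer inward while-loop by sort + split-into-halves + zip interleave (alternative
-- decomposition, same cost). Both A and B sort the argument in place in Python; the equivalence proved
-- here is about the return value (the in-place mutation is the identical sort in both).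

-- ===== PORT A =====
-- A's while-loop: left/right walk inward; arr[left]/arr[right] are always in range when read,
-- so pyGetD with default 0 is exact here
def pyloopA (s : List Int) (l r : Int) : List Int :=
  if l ≤ r then
    if l = r then [PySem.List.pyGetD s l 0]
    else PySem.List.pyGetD s r 0 :: PySem.List.pyGetD s l 0 :: pyloopA s (l + 1) (r - 1)
  else []
termination_by (r - l + 1).toNat
decreasing_by omega

def alternate_array_sort (arr : List Int) : List Int :=
  let s := PySem.List.sorted arr (fun x => x) false
  pyloopA s 0 ((s.length : Int) - 1)

-- ===== PORT B =====
def alternate_array_sort_alt (arr : List Int) : List Int :=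
  let s := PySem.List.sorted arr (fun x => x) false
  let n : Int := s.length
  let larges := (PySem.List.slice s (some (PySem.Int.floordiv (n + 1) 2)) none).reverse
  let smalls := PySem.List.slice s none (some (PySem.Int.floordiv n 2))
  let result := (larges.zip smalls).flatMap (fun p => [p.1, p.2])
  if PySem.Int.mod n 2 = 1 then result ++ [PySem.List.pyGetD s (PySem.Int.floordiv n 2) 0]
  else result

-- ===== PRECONDITION & SPEC =====
def Spec_alternate_array_sort (arr : List Int) (out : List Int) : Prop := out = alternate_array_sort_alt arr
instance (arr : List Int) (out : List Int) : Decidable (Spec_alternate_array_sort arr out) := by unfold Spec_alternate_array_sort; infer_instance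

-- ===== CLAIM (what is proved, stated in full; the proofs are below) =====
def Claim_equal_alternate_array_sort : Prop := ∀ (arr : List Int), Dom_alternate_array_sort arr → Spec_alternate_array_sort arr (alternate_array_sort arr)

-- ===== LEMMAS AND PROOFS =====

-- the common inward-peeling shape: first-and-last of the remaining segment, recurse on the middle
def twist : List Int → List Int
  | [] => []
  | [x] => [x]
  | x :: y :: rest => (y :: rest).getLastD 0 :: x :: twist ((y :: rest).dropLast)
termination_by t => t.length
decreasing_by simp [List.length_dropLast]

theorem twist_cons_cons (x : Int) (u : List Int) (h : u ≠ []) :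
    twist (x :: u) = u.getLastD 0 :: x :: twist u.dropLast := by
  cases u with
  | nil => exact absurd rfl h
  | cons y rest => simp [twist]

-- A's loop computes twist of the segment s[l..r]
theorem pyloopA_eq_twist_aux (s : List Int) (k : Nat) :
    ∀ (l r : Int), 0 ≤ l → r < s.length → (r - l + 1).toNat ≤ k →
      pyloopA s l r = twist ((s.drop l.toNat).take (r - l + 1).toNat) := by
  induction k with
  | zero =>
    intro l r hl hr hk
    have hlr : ¬ l ≤ r := by omega
    have h0 : (r - l + 1).toNat = 0 := by omega
    rw [pyloopA, h0]
    simp [hlr, twist]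
  | succ k ih =>
    intro l r hl hr hk
    by_cases hlr : l ≤ r
    · by_cases heq : l = r
      · subst heq
        rw [pyloopA]
        simp only [hlr, if_true]
        have h1 : (l - l + 1).toNat = 1 := by omega
        rw [h1]
        have hlt : l.toNat < s.length := by omega
        have hdrop : s.drop l.toNat = s[l.toNat] :: s.drop (l.toNat + 1) :=
          List.drop_eq_getElem_cons hlt
        have htake : List.take 1 (List.drop l.toNat s) = [s[l.toNat]] := by rw [hdrop]; rfl
        rw [htake, PySem.List.pyGetD_eq_getElem s 0 hl (by omega)]
        simp [twist]
      · rw [pyloopA]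
        simp only [hlr, if_true, heq]
        rw [ih (l + 1) (r - 1) (by omega) (by omega) (by omega)]
        have hab : l.toNat < r.toNat := by omega
        have hblen : r.toNat < s.length := by omega
        have hk1 : (r - l + 1).toNat = (r.toNat - l.toNat - 1) + 1 + 1 := by omega
        have hk2 : (r - 1 - (l + 1) + 1).toNat = r.toNat - l.toNat - 1 := by omega
        have ha1 : (l + 1).toNat = l.toNat + 1 := by omega
        rw [hk1, hk2, ha1]
        have hdropa : s.drop l.toNat = s[l.toNat] :: s.drop (l.toNat + 1) :=
          List.drop_eq_getElem_cons (by omega)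
        rw [hdropa, List.take_succ_cons]
        have hulen : ((s.drop (l.toNat + 1)).take (r.toNat - l.toNat - 1 + 1)).length
            = r.toNat - l.toNat := by
          simp [List.length_take, List.length_drop]; omega
        have hu_ne : (s.drop (l.toNat + 1)).take (r.toNat - l.toNat - 1 + 1) ≠ [] := by
          intro h; rw [h] at hulen; simp at hulen; omega
        rw [twist_cons_cons _ _ hu_ne]
        have hlast : ((s.drop (l.toNat + 1)).take (r.toNat - l.toNat - 1 + 1)).getLastD 0
            = s[r.toNat] := by
          rw [List.getLastD_eq_getLast?, List.getLast?_eq_getElem?, hulen]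
          rw [List.getElem?_take_of_lt (by omega), List.getElem?_drop]
          have : l.toNat + 1 + (r.toNat - l.toNat - 1) = r.toNat := by omega
          rw [this, List.getElem?_eq_getElem hblen]
          rfl
        have hdl : ((s.drop (l.toNat + 1)).take (r.toNat - l.toNat - 1 + 1)).dropLast
            = (s.drop (l.toNat + 1)).take (r.toNat - l.toNat - 1) := by
          rw [List.dropLast_eq_take, hulen, List.take_take]
          congr 1; omega
        rw [hlast, hdl,
          PySem.List.pyGetD_eq_getElem s 0 hl (by omega),
          PySem.List.pyGetD_eq_getElem s 0 (by omega : (0:Int) ≤ r) (by omega)]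
        simp
    · have h0 : (r - l + 1).toNat = 0 := by omega
      rw [pyloopA, h0]
      simp [hlr, twist]

-- B's halves-and-zip construction computes twist too
theorem bcore_eq_twist (t : List Int) :
    ((((t.drop ((t.length + 1) / 2)).reverse).zip (t.take (t.length / 2))).flatMap
        (fun p => [p.1, p.2])) ++
      (if t.length % 2 = 1 then [t.getD (t.length / 2) 0] else []) = twist t := by
  induction t using twist.induct with
  | case1 => simp [twist]
  | case2 x => simp [twist]
  | case3 x y rest ih =>
    set u := y :: rest with hu
    have hune : u ≠ [] := by simp [hu]
    obtain ⟨m, z, hmz⟩ : ∃ m z, u = m ++ [z] :=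
      ⟨u.dropLast, u.getLast hune, (List.dropLast_append_getLast hune).symm⟩
    have hdl : u.dropLast = m := by simp [hmz]
    have hlast : u.getLastD 0 = z := by simp [hmz]
    rw [hdl] at ih
    rw [twist_cons_cons x u hune, hdl, hlast, ← ih, hmz]
    set k := m.length with hk
    have hlen : (x :: (m ++ [z])).length = k + 2 := by simp [hk]
    rw [hlen]
    have h1 : (k + 2 + 1) / 2 = (k + 1) / 2 + 1 := by omega
    have h2 : (k + 2) / 2 = k / 2 + 1 := by omega
    rw [h1, h2]
    have hd : List.drop ((k + 1) / 2 + 1) (x :: (m ++ [z])) = List.drop ((k + 1) / 2) m ++ [z] := by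
      rw [List.drop_succ_cons, List.drop_append_of_le_length (by omega)]
    have ht : List.take (k / 2 + 1) (x :: (m ++ [z])) = x :: List.take (k / 2) m := by
      rw [List.take_succ_cons, List.take_append_of_le_length (by omega)]
    rw [hd, ht, List.reverse_append]
    simp only [List.reverse_singleton, List.singleton_append, List.zip_cons_cons,
      List.flatMap_cons]
    have hm : (k + 2) % 2 = k % 2 := by omega
    rw [hm]
    have hg : (x :: (m ++ [z])).getD (k / 2 + 1) 0 = (m ++ [z]).getD (k / 2) 0 := rfl
    by_cases hpar : k % 2 = 1
    · have hg2 : (m ++ [z])[k / 2]? = m[k / 2]? := List.getElem?_append_left (by omega)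
      simp [hpar, List.getD, hg2]
    · simp [hpar]

-- ===== VERDICT (by name: the statement is the Claim_ definition above) =====
theorem alternate_array_sort_spec : Claim_equal_alternate_array_sort := by
  intro arr _
  unfold Spec_alternate_array_sort alternate_array_sort alternate_array_sort_alt
  set s := PySem.List.sorted arr (fun x => x) false with hs
  have hfd1 : PySem.Int.floordiv ((s.length : Int) + 1) 2 = (((s.length + 1) / 2 : Nat) : Int) := by
    exact_mod_cast PySem.Int.floordiv_natCast (s.length + 1) 2
  have hfd2 : PySem.Int.floordiv (s.length : Int) 2 = ((s.length / 2 : Nat) : Int) := by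
    exact_mod_cast PySem.Int.floordiv_natCast s.length 2
  have hmod : PySem.Int.mod (s.length : Int) 2 = ((s.length % 2 : Nat) : Int) := by
    exact_mod_cast PySem.Int.mod_natCast s.length 2
  have hA : pyloopA s 0 ((s.length : Int) - 1) = twist s := by
    rw [pyloopA_eq_twist_aux s s.length 0 ((s.length : Int) - 1) le_rfl (by omega) (by omega)]
    have h : ((s.length : Int) - 1 - 0 + 1).toNat = s.length := by omega
    rw [h]
    simp
  simp only [hA, hfd1, hfd2, hmod, PySem.List.slice_from_natCast, PySem.List.slice_to_natCast,
    PySem.List.pyGetD_natCast]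
  rw [← bcore_eq_twist s]
  by_cases hp : s.length % 2 = 1
  · simp [hp]
  · simp [hp]
    omega
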